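-- pv_equiv track=rewrite | github.com/VollcomDigital/quant-system | src/core/collection_manager.py | _classify_asset_types
-- ===== SOURCE A (Python) =====
-- def _classify_asset_types(symbols: set) -> dict[str, int]:
--     crypto_count = len(
--         [
--             s
--             for s in symbols
--             if any(c in s.upper() for c in ["BTC", "ETH", "USD", "USDT"])
--         ]
--     )
--     forex_count = len([s for s in symbols if s.endswith("=X")])
--     stock_count = len(symbols) - crypto_count - forex_count
--
--     return {"stocks": stock_count, "crypto": crypto_count, "forex": forex_count}
-- ===== SOURCE B (Python) =====
-- def _classify_asset_types(symbols: set) -> dict[str, int]: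
--     # All crypto needles have length 3 once the redundant "USDT" (which contains
--     # "USD") is dropped, so one sliding 3-gram scan with a set lookup replaces
--     # the four separate substring searches.
--     trigrams = {"BTC", "ETH", "USD"}
--     crypto = 0
--     forex = 0
--     for s in symbols:
--         u = s.upper()
--         if any(u[i:i + 3] in trigrams for i in range(len(u) - 2)):
--             crypto += 1
--         if s.endswith("=X"):
--             forex += 1
--     return {"stocks": len(symbols) - crypto - forex, "crypto": crypto, "forex": forex}
-- ===== Notes on version B (the rewrite author's own statement) =====
-- stated objective: alternative
-- what changed: Replaces A's four per-needle substring searches (per symbol, over two filtering passes) by a single accumulator pass that slides a 3-character window over each uppercased symbol once and tests each trigram against the set {BTC, ETH, USD} ('USDT' is dropped as redundant: any string containing 'USDT' contains 'USD'); crypto and forex tests stay independent so symbols matching both are double-counted exactly as in A.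
import Mathlib
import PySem

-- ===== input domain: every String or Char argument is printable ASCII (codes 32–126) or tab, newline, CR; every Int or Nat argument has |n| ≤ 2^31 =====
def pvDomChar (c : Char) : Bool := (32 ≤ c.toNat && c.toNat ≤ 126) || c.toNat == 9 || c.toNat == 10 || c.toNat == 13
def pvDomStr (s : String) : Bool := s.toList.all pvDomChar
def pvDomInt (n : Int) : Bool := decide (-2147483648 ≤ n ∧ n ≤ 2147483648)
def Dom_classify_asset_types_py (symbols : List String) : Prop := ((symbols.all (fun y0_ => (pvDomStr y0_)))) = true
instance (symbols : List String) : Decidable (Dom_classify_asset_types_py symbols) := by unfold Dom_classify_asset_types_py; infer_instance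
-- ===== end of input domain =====

-- B replaces A's four per-needle substring searches ("USDT" is redundant: it contains "USD") by one
-- sliding 3-gram scan of the uppercased symbol against a set, in a single accumulator pass; same return value.


-- ===== PORT A =====
def classify_asset_types_py (symbols : List String) : List (String × Int) :=
  let crypto_count : Int :=
    ((symbols.filter (fun s =>
      (["BTC", "ETH", "USD", "USDT"] : List String).any
        (fun c => PySem.Str.isIn c (PySem.Str.upper s)))).length : Int)
  let forex_count : Int :=
    ((symbols.filter (fun s => PySem.Str.endswith s "=X")).length : Int)
  let stock_count : Int := (symbols.length : Int) - crypto_count - forex_count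
  [("stocks", stock_count), ("crypto", crypto_count), ("forex", forex_count)]

-- ===== PORT B =====
-- the set {"BTC", "ETH", "USD"} of trigrams, as its list of distinct elements (char lists)
def pvTrigrams : List (List Char) := [['B','T','C'], ['E','T','H'], ['U','S','D']]

-- any(u[i:i+3] in trigrams for i in range(len(u) - 2)), on the uppercased symbol
def pvCryptoB (s : String) : Bool :=
  let u := PySem.Chars.upper s.toList
  (PySem.List.pyRange 0 ((u.length : Int) - 2) 1).any
    (fun i => pvTrigrams.contains (PySem.List.slice u (some i) (some (i + 3))))

def pvStepB (acc : Int × Int) (s : String) : Int × Int :=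
  let c := if pvCryptoB s then acc.1 + 1 else acc.1
  let f := if PySem.Str.endswith s "=X" then acc.2 + 1 else acc.2
  (c, f)

def classify_asset_types_py_alt (symbols : List String) : List (String × Int) :=
  let cf := symbols.foldl pvStepB (0, 0)
  [("stocks", (symbols.length : Int) - cf.1 - cf.2), ("crypto", cf.1), ("forex", cf.2)]

-- ===== PRECONDITION & SPEC =====
def Spec_classify_asset_types_py (symbols : List String) (out : List (String × Int)) : Prop := out = classify_asset_types_py_alt symbols
instance (symbols : List String) (out : List (String × Int)) : Decidable (Spec_classify_asset_types_py symbols out) := by unfold Spec_classify_asset_types_py; infer_instance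

-- ===== CLAIM (what is proved, stated in full; the proofs are below) =====
def Claim_equal_classify_asset_types_py : Prop := ∀ (symbols : List String), Dom_classify_asset_types_py symbols → Spec_classify_asset_types_py symbols (classify_asset_types_py symbols)

-- ===== LEMMAS AND PROOFS =====

lemma pvWindow_iff (u t : List Char) (ht : t.length = 3) :
    ((PySem.List.pyRange 0 ((u.length : Int) - 2) 1).any
      (fun i => PySem.List.slice u (some i) (some (i + 3)) = t))
    = true ↔ ∃ j : Nat, t <+: u.drop j := by
  rw [List.any_eq_true]
  constructor
  · rintro ⟨i, hi, hsl⟩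
    rw [PySem.List.mem_pyRange_one] at hi
    obtain ⟨h0, h2⟩ := hi
    refine ⟨i.toNat, ?_⟩
    have hi' : (i.toNat : Int) = i := Int.toNat_of_nonneg h0
    have h3 : ((3 : Nat) : Int) = 3 := by norm_num
    rw [← hi', ← h3, PySem.List.slice_natCast_add] at hsl
    simp only [decide_eq_true_eq] at hsl
    rw [← hsl]
    exact List.take_prefix _ _
  · rintro ⟨j, hpre⟩
    have hlen : j + 3 ≤ u.length := by
      have := hpre.length_le
      rw [List.length_drop, ht] at this
      omega
    refine ⟨(j : Int), ?_, ?_⟩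
    · rw [PySem.List.mem_pyRange_one]
      exact ⟨Int.natCast_nonneg j, by omega⟩
    · have h3 : ((3 : Nat) : Int) = 3 := by norm_num
      rw [← h3, PySem.List.slice_natCast_add]
      simp only [decide_eq_true_eq]
      rw [List.prefix_iff_eq_take] at hpre
      rw [ht] at hpre
      exact hpre.symm

def pvCryptoA (s : String) : Bool :=
  (["BTC", "ETH", "USD", "USDT"] : List String).any
    (fun c => PySem.Str.isIn c (PySem.Str.upper s))

lemma pvCryptoB_iff (u : List Char) :
    ((PySem.List.pyRange 0 ((u.length : Int) - 2) 1).any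
      (fun i => pvTrigrams.contains (PySem.List.slice u (some i) (some (i + 3))))) = true ↔
    (∃ j : Nat, ['B','T','C'] <+: u.drop j) ∨ (∃ j : Nat, ['E','T','H'] <+: u.drop j) ∨
      (∃ j : Nat, ['U','S','D'] <+: u.drop j) := by
  rw [show (fun i => pvTrigrams.contains (PySem.List.slice u (some i) (some (i + 3)))) =
      (fun i => (PySem.List.slice u (some i) (some (i + 3)) = ['B','T','C'] ||
                 (PySem.List.slice u (some i) (some (i + 3)) = ['E','T','H'] ||
                  PySem.List.slice u (some i) (some (i + 3)) = ['U','S','D']))) from by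
    funext i; simp [pvTrigrams]]
  rw [List.any_eq_true]
  simp only [Bool.or_eq_true]
  rw [← pvWindow_iff u ['B','T','C'] rfl, ← pvWindow_iff u ['E','T','H'] rfl, ← pvWindow_iff u ['U','S','D'] rfl]
  simp only [List.any_eq_true, decide_eq_true_eq]
  constructor
  · rintro ⟨i, hi, h | h | h⟩
    exacts [Or.inl ⟨i, hi, h⟩, Or.inr (Or.inl ⟨i, hi, h⟩), Or.inr (Or.inr ⟨i, hi, h⟩)]
  · rintro (⟨i, hi, h⟩ | ⟨i, hi, h⟩ | ⟨i, hi, h⟩)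
    exacts [⟨i, hi, Or.inl h⟩, ⟨i, hi, Or.inr (Or.inl h)⟩, ⟨i, hi, Or.inr (Or.inr h)⟩]

lemma pvCrypto_eq (s : String) : pvCryptoB s = pvCryptoA s := by
  rw [Bool.eq_iff_iff]
  have hB := pvCryptoB_iff (PySem.Chars.upper s.toList)
  have hA : pvCryptoA s = true ↔
      PySem.Chars.isIn "BTC".toList (PySem.Chars.upper s.toList) = true ∨
      PySem.Chars.isIn "ETH".toList (PySem.Chars.upper s.toList) = true ∨
      PySem.Chars.isIn "USD".toList (PySem.Chars.upper s.toList) = true ∨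
      PySem.Chars.isIn "USDT".toList (PySem.Chars.upper s.toList) = true := by
    unfold pvCryptoA
    simp only [List.any_cons, List.any_nil, Bool.or_eq_true, Bool.false_eq_true, or_false,
      PySem.Str.isIn_eq, PySem.Str.toList_upper]
  rw [show pvCryptoB s = ((PySem.List.pyRange 0 (((PySem.Chars.upper s.toList).length : Int) - 2) 1).any
      (fun i => pvTrigrams.contains (PySem.List.slice (PySem.Chars.upper s.toList) (some i) (some (i + 3))))) from rfl]
  rw [hB, hA]
  have e1 := PySem.Chars.exists_prefix_drop_iff_isIn "BTC".toList (PySem.Chars.upper s.toList)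
  have e2 := PySem.Chars.exists_prefix_drop_iff_isIn "ETH".toList (PySem.Chars.upper s.toList)
  have e3 := PySem.Chars.exists_prefix_drop_iff_isIn "USD".toList (PySem.Chars.upper s.toList)
  have e4 := PySem.Chars.exists_prefix_drop_iff_isIn "USDT".toList (PySem.Chars.upper s.toList)
  have hred : PySem.Chars.isIn "USDT".toList (PySem.Chars.upper s.toList) = true →
      PySem.Chars.isIn "USD".toList (PySem.Chars.upper s.toList) = true := by
    intro h
    rw [← e4] at h
    rw [← e3]
    obtain ⟨j, hj⟩ := h
    exact ⟨j, List.IsPrefix.trans (by decide) hj⟩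
  have hb : "BTC".toList = ['B','T','C'] := by decide
  have he : "ETH".toList = ['E','T','H'] := by decide
  have hs : "USD".toList = ['U','S','D'] := by decide
  rw [hb] at e1; rw [he] at e2; rw [hs] at e3
  constructor
  · rintro (h | h | h)
    · exact Or.inl (e1.mp h)
    · exact Or.inr (Or.inl (e2.mp h))
    · exact Or.inr (Or.inr (Or.inl (e3.mp h)))
  · rintro (h | h | h | h)
    · exact Or.inl (e1.mpr h)
    · exact Or.inr (Or.inl (e2.mpr h))
    · exact Or.inr (Or.inr (e3.mpr h))
    · exact Or.inr (Or.inr (e3.mpr (hred h)))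

lemma pvFoldB (symbols : List String) (a b : Int) :
    symbols.foldl pvStepB (a, b)
      = (a + ((symbols.filter pvCryptoA).length : Int),
         b + ((symbols.filter (fun s => PySem.Str.endswith s "=X")).length : Int)) := by
  induction symbols generalizing a b with
  | nil => simp
  | cons s t ih =>
    rw [List.foldl_cons, pvStepB, ih, List.filter_cons, List.filter_cons]
    rw [pvCrypto_eq]
    by_cases hc : pvCryptoA s <;> by_cases hf : PySem.Str.endswith s "=X" <;>
      simp only [hc, hf, if_true, List.length_cons, Prod.mk.injEq] <;>
      constructor <;> push_cast <;> ring

-- ===== VERDICT (by name: the statement is the Claim_ definition above) =====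
theorem classify_asset_types_py_spec : Claim_equal_classify_asset_types_py := by
  intro symbols _
  unfold Spec_classify_asset_types_py classify_asset_types_py classify_asset_types_py_alt
  have hA : (fun s => (["BTC", "ETH", "USD", "USDT"] : List String).any
      (fun c => PySem.Str.isIn c (PySem.Str.upper s))) = pvCryptoA := rfl
  simp only [hA, pvFoldB, zero_add]
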